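-- pv_equiv track=rewrite | github.com/BiaaMoreira/distribuicao_equitativa_valores | main.py | distribuir_horas_trabalho
-- ===== SOURCE A (Python) =====
-- def distribuir_horas_trabalho(horas_totais, qtd_funcionarios):
--     incremento = 10
--     horas_restantes = horas_totais
--     horas_funcionarios = []
--
--     for i in range(qtd_funcionarios):
--         horas_funcionarios.append(20)
--     horas_restantes -= 20 * qtd_funcionarios
--     while (horas_restantes > 0):
--         for i in range(qtd_funcionarios):
--             if (horas_restantes > 0):
--                 horas_funcionarios[i] += incremento
--                 horas_restantes -= incremento
--     return horas_funcionarios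
-- ===== SOURCE B (Python) =====
-- def distribuir_horas_trabalho(horas_totais, qtd_funcionarios):
--     restantes = horas_totais - 20 * qtd_funcionarios
--     if qtd_funcionarios <= 0 or restantes <= 0:
--         return [20] * qtd_funcionarios
--     n = -(-restantes // 10)          # number of 10h increments, ceil(restantes/10)
--     d, m = divmod(n, qtd_funcionarios)
--     return [20 + 10 * (d + (1 if i < m else 0)) for i in range(qtd_funcionarios)]
-- ===== Notes on version B (the rewrite author's own statement) =====
-- stated objective: faster
-- what changed: Replaces the round-robin while/for loop (one iteration per 10-hour increment) by a closed form: n = ceil(remaining/10) increments, split as n//qtd each plus one extra for the first n%qtd employees.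
import Mathlib
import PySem

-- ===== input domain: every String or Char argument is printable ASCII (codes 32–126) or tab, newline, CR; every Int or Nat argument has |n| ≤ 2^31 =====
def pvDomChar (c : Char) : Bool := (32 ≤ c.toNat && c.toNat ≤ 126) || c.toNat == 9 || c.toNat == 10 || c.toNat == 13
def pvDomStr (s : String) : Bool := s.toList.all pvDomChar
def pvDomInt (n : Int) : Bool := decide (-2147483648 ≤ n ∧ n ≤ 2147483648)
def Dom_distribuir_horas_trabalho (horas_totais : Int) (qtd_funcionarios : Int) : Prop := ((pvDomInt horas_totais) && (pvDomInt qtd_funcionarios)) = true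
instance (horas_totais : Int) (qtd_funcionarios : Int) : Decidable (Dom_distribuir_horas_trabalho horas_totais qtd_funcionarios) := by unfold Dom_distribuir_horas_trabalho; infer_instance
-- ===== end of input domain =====

-- B replaces A's increment-by-increment round-robin loop by the closed form
-- n = ceil(remaining/10) increments split as n//qtd each plus one extra for the first n%qtd
-- employees (objective: faster, O(qtd) instead of O(horas_totais/10 + qtd)).

-- ===== PORT A =====
-- body of the inner 'for i in range(qtd_funcionarios)' of the while loop;
-- i ∈ range(qtd_funcionarios) is always nonnegative and in range, so '.toNat' and
-- List.modify are exact here (Python 'horas_funcionarios[i] += incremento')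
def pvA_step (st : List Int × Int) (i : Int) : List Int × Int :=
  if st.2 > 0 then (st.1.modify i.toNat (· + 10), st.2 - 10) else st

-- termination helpers for the while loop (cited in decreasing_by)
theorem pvA_step_snd_le (l : List Int) : ∀ (st : List Int × Int), (l.foldl pvA_step st).2 ≤ st.2 := by
  induction l with
  | nil => intro st; simp
  | cons i t ih =>
    intro st
    have h := ih (pvA_step st i)
    simp only [List.foldl_cons]
    by_cases hr : st.2 > 0
    · simp only [pvA_step, if_pos hr] at h ⊢; omega
    · simp only [pvA_step, if_neg hr] at h ⊢; omega

theorem pvA_step_snd_lt (i : Int) (t : List Int) (st : List Int × Int) (hr : st.2 > 0) :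
    ((i :: t).foldl pvA_step st).2 ≤ st.2 - 10 := by
  have h := pvA_step_snd_le t (pvA_step st i)
  simp only [List.foldl_cons]
  simp only [pvA_step, if_pos hr] at h ⊢
  omega

-- 'while (horas_restantes > 0): for i in range(qtd_funcionarios): …'
-- the extra '0 < q' conjunct only makes the recursion total: with q ≤ 0 and r > 0 the
-- Python loop never terminates (those inputs are excluded by Pre_ below)
def pvA_loop (q : Int) (hs : List Int) (r : Int) : List Int :=
  if h : 0 < r ∧ 0 < q then
    let st := (PySem.List.pyRange 0 q 1).foldl pvA_step (hs, r)
    pvA_loop q st.1 st.2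
  else hs
termination_by r.toNat
decreasing_by
  have hcons : PySem.List.pyRange 0 q 1 = 0 :: PySem.List.pyRange 1 q 1 :=
    PySem.List.pyRange_one_cons h.2
  have := pvA_step_snd_lt 0 (PySem.List.pyRange 1 q 1) (hs, r) h.1
  rw [hcons]
  omega

def distribuir_horas_trabalho (horas_totais : Int) (qtd_funcionarios : Int) : List Int :=
  let horas_funcionarios :=
    (PySem.List.pyRange 0 qtd_funcionarios 1).foldl (fun acc _ => acc ++ [20]) []
  let horas_restantes := horas_totais - 20 * qtd_funcionarios
  pvA_loop qtd_funcionarios horas_funcionarios horas_restantes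

-- ===== PORT B =====
def distribuir_horas_trabalho_alt (horas_totais : Int) (qtd_funcionarios : Int) : List Int :=
  let restantes := horas_totais - 20 * qtd_funcionarios
  if qtd_funcionarios ≤ 0 ∨ restantes ≤ 0 then
    List.replicate qtd_funcionarios.toNat 20          -- [20] * qtd_funcionarios
  else
    let n := -(PySem.Int.floordiv (-restantes) 10)    -- -(-restantes // 10) = ceil
    let d := PySem.Int.floordiv n qtd_funcionarios
    let m := PySem.Int.mod n qtd_funcionarios
    (PySem.List.pyRange 0 qtd_funcionarios 1).map
      (fun i => 20 + 10 * (d + if i < m then 1 else 0))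

-- ===== PRECONDITION & SPEC =====
-- Pre_ excludes exactly the inputs on which the Python A never returns: with
-- qtd_funcionarios ≤ 0 and a positive remainder the while loop runs forever.
def Pre_distribuir_horas_trabalho (horas_totais : Int) (qtd_funcionarios : Int) : Prop :=
  0 < qtd_funcionarios ∨ horas_totais ≤ 20 * qtd_funcionarios
instance (horas_totais : Int) (qtd_funcionarios : Int) : Decidable (Pre_distribuir_horas_trabalho horas_totais qtd_funcionarios) := by unfold Pre_distribuir_horas_trabalho; infer_instance

def pvWitness_distribuir_horas_trabalho : Int × Int := (100, 3)

def Spec_distribuir_horas_trabalho (horas_totais : Int) (qtd_funcionarios : Int) (out : List Int) : Prop := out = distribuir_horas_trabalho_alt horas_totais qtd_funcionarios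
instance (horas_totais : Int) (qtd_funcionarios : Int) (out : List Int) : Decidable (Spec_distribuir_horas_trabalho horas_totais qtd_funcionarios out) := by unfold Spec_distribuir_horas_trabalho; infer_instance

-- ===== CLAIM (what is proved, stated in full; the proofs are below) =====
def Claim_equal_distribuir_horas_trabalho : Prop := ∀ (horas_totais : Int) (qtd_funcionarios : Int), Dom_distribuir_horas_trabalho horas_totais qtd_funcionarios → Pre_distribuir_horas_trabalho horas_totais qtd_funcionarios → Spec_distribuir_horas_trabalho horas_totais qtd_funcionarios (distribuir_horas_trabalho horas_totais qtd_funcionarios)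

-- ===== LEMMAS AND PROOFS =====

-- ceiling division by 10, the quantity B computes as -(-r // 10)
def pvCeil10 (r : Int) : Int := -(PySem.Int.floordiv (-r) 10)

theorem pvCeil10_bracket (r : Int) : (pvCeil10 r - 1) * 10 < r ∧ r ≤ pvCeil10 r * 10 :=
  (PySem.Int.neg_floordiv_neg_eq_iff_of_pos (by norm_num)).mp rfl

theorem pvCeil10_sub10 (r : Int) : pvCeil10 (r - 10) = pvCeil10 r - 1 := by
  have h := pvCeil10_bracket r
  exact (PySem.Int.neg_floordiv_neg_eq_iff_of_pos (by norm_num)).mpr (by constructor <;> omega)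

-- one pass of the inner for loop, characterised pointwise:
-- the first k = min (q - a) (max 0 ⌈r/10⌉) visited employees get +10, r drops by 10*k
theorem pvA_pass_spec : ∀ (N : Nat) (q a : Int) (hs : List Int) (r : Int),
    (q - a).toNat ≤ N → 0 ≤ a → a ≤ q →
    ((PySem.List.pyRange a q 1).foldl pvA_step (hs, r)).2
        = r - 10 * min (q - a) (max 0 (pvCeil10 r)) ∧
    ((PySem.List.pyRange a q 1).foldl pvA_step (hs, r)).1.length = hs.length ∧
    ∀ j : Nat, (((PySem.List.pyRange a q 1).foldl pvA_step (hs, r)).1)[j]?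
        = if a ≤ (j : Int) ∧ (j : Int) < a + min (q - a) (max 0 (pvCeil10 r))
          then (hs[j]?).map (· + 10) else hs[j]? := by
  intro N
  induction N with
  | zero =>
    intro q a hs r hN ha haq
    have hqa : q ≤ a := by omega
    rw [PySem.List.pyRange_one_eq_nil hqa]
    simp only [List.foldl_nil]
    refine ⟨by omega, trivial, ?_⟩
    intro j
    have : ¬((a : Int) ≤ (j : Int) ∧ (j : Int) < a + min (q - a) (max 0 (pvCeil10 r))) := by omega
    simp [this]
  | succ N ih =>
    intro q a hs r hN ha haq
    by_cases hqa : a < q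
    · rw [PySem.List.pyRange_one_cons hqa]
      simp only [List.foldl_cons]
      by_cases hr : r > 0
      · -- this step fires: employee a gets +10, r -= 10
        have hc1 : 1 ≤ pvCeil10 r := by have := pvCeil10_bracket r; omega
        simp only [pvA_step, if_pos hr]
        have hIH := ih q (a + 1) (hs.modify a.toNat (· + 10)) (r - 10) (by omega) (by omega) (by omega)
        have hk : min (q - (a + 1)) (max 0 (pvCeil10 (r - 10)))
            = min (q - a) (max 0 (pvCeil10 r)) - 1 := by
          rw [pvCeil10_sub10]; omega
        obtain ⟨h2, hlen, hidx⟩ := hIH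
        refine ⟨by rw [h2, hk]; ring, by rw [hlen, List.length_modify], ?_⟩
        intro j
        have hmod : (hs.modify a.toNat (· + 10))[j]?
            = (fun x => if a.toNat = j then x + 10 else x) <$> hs[j]? :=
          List.getElem?_modify _ _ _ _
        rw [hidx j, hk, hmod]
        by_cases hj : a.toNat = j
        · have hcond1 : ¬(a + 1 ≤ (j : Int) ∧
              (j : Int) < a + 1 + (min (q - a) (max 0 (pvCeil10 r)) - 1)) := by omega
          have hcond2 : (a : Int) ≤ (j : Int) ∧
              (j : Int) < a + min (q - a) (max 0 (pvCeil10 r)) := by omega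
          rw [if_neg hcond1, if_pos hcond2]
          cases hs[j]? <;> simp [hj]
        · have hcond : (a + 1 ≤ (j : Int) ∧
              (j : Int) < a + 1 + (min (q - a) (max 0 (pvCeil10 r)) - 1)) ↔
              ((a : Int) ≤ (j : Int) ∧
              (j : Int) < a + min (q - a) (max 0 (pvCeil10 r))) := by omega
          by_cases hcase : (a : Int) ≤ (j : Int) ∧
              (j : Int) < a + min (q - a) (max 0 (pvCeil10 r))
          · rw [if_pos (hcond.mpr hcase), if_pos hcase]; cases hs[j]? <;> simp [hj]
          · rw [if_neg (fun h => hcase (hcond.mp h)), if_neg hcase]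
            cases hs[j]? <;> simp [hj]
      · -- r ≤ 0: nothing changes for this employee nor later ones
        have hc0 : pvCeil10 r ≤ 0 := by have := pvCeil10_bracket r; omega
        simp only [pvA_step, if_neg hr]
        have hIH := ih q (a + 1) hs r (by omega) (by omega) (by omega)
        obtain ⟨h2, hlen, hidx⟩ := hIH
        have hk1 : min (q - (a + 1)) (max 0 (pvCeil10 r)) = 0 := by omega
        have hk2 : min (q - a) (max 0 (pvCeil10 r)) = 0 := by omega
        refine ⟨by rw [h2, hk1, hk2], hlen, ?_⟩
        intro j
        rw [hidx j, hk1, hk2]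
        have c1 : ¬(a + 1 ≤ (j : Int) ∧ (j : Int) < a + 1 + 0) := by omega
        have c2 : ¬((a : Int) ≤ (j : Int) ∧ (j : Int) < a + 0) := by omega
        rw [if_neg c1, if_neg c2]
    · rw [PySem.List.pyRange_one_eq_nil (by omega)]
      simp only [List.foldl_nil]
      refine ⟨by omega, trivial, ?_⟩
      intro j
      have : ¬((a : Int) ≤ (j : Int) ∧ (j : Int) < a + min (q - a) (max 0 (pvCeil10 r))) := by
        omega
      simp [this]

-- the whole while loop: with n = ⌈r/10⌉ increments to hand out, employee j ends with
-- hs[j] + 10*(n // q + (1 if j < n % q else 0))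
theorem pvA_loop_spec : ∀ (N : Nat) (r : Int), r.toNat ≤ N → ∀ (q : Int) (hs : List Int),
    0 < q → hs.length = q.toNat →
    (pvA_loop q hs r).length = hs.length ∧
    ∀ j : Nat, (pvA_loop q hs r)[j]? =
      if 0 < r then
        (hs[j]?).map (· + 10 * (PySem.Int.floordiv (pvCeil10 r) q
            + if (j : Int) < PySem.Int.mod (pvCeil10 r) q then 1 else 0))
      else hs[j]? := by
  intro N
  induction N with
  | zero =>
    intro r hN q hs hq hlen
    have hr : ¬ 0 < r := by omega
    rw [pvA_loop, dif_neg (by omega)]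
    exact ⟨rfl, fun j => by rw [if_neg hr]⟩
  | succ N ih =>
    intro r hN q hs hq hlen
    by_cases hr : 0 < r
    · have hbr := pvCeil10_bracket r
      have hc1 : 1 ≤ pvCeil10 r := by omega
      obtain ⟨hp2, hplen, hpidx⟩ :=
        pvA_pass_spec ((q : Int) - 0).toNat q 0 hs r (le_refl _) (le_refl 0) (by omega)
      set c := pvCeil10 r with hcdef
      have hkc : min ((q : Int) - 0) (max 0 c) = min q c := by omega
      rw [pvA_loop, dif_pos ⟨hr, hq⟩]
      set st := (PySem.List.pyRange 0 q 1).foldl pvA_step (hs, r) with hst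
      by_cases hcq : c ≤ q
      · -- last pass: only the first c employees get an increment, then r' ≤ 0
        have hkeq : min q c = c := by omega
        have hr2 : st.2 = r - 10 * c := by rw [hp2, hkc, hkeq]
        have hr2le : st.2 ≤ 0 := by omega
        obtain ⟨hlen', hidx'⟩ := ih st.2 (by omega) q st.1 hq (by rw [hplen, hlen])
        have hd : PySem.Int.floordiv c q = if c = q then 1 else 0 := by
          by_cases hcq' : c = q
          · rw [if_pos hcq']
            exact (PySem.Int.floordiv_eq_iff_of_pos hq).mpr (by constructor <;> nlinarith)
          · rw [if_neg hcq']
            exact (PySem.Int.floordiv_eq_iff_of_pos hq).mpr (by constructor <;> omega)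
        have hm : PySem.Int.mod c q = if c = q then 0 else c := by
          have h1 := PySem.Int.floordiv_mul_add_mod c q
          rw [hd] at h1
          by_cases hcq' : c = q
          · rw [if_pos hcq'] at h1 ⊢; omega
          · rw [if_neg hcq'] at h1 ⊢; omega
        refine ⟨by rw [hlen', hplen], ?_⟩
        intro j
        rw [hidx' j, if_neg (by omega), hpidx j, hkc, hkeq, if_pos hr]
        by_cases hj : (j : Int) < c
        · rw [if_pos ⟨by omega, by omega⟩]
          have : (PySem.Int.floordiv c q + if (j : Int) < PySem.Int.mod c q then 1 else 0)
              = 1 := by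
            rw [hd, hm]; by_cases hcq' : c = q
            · simp [hcq']
            · rw [if_neg hcq', if_neg hcq', if_pos hj]; norm_num
          rw [this]; cases hs[j]? <;> simp
        · rw [if_neg (by omega)]
          have hjq : ¬ (j : Int) < q ∨ (j : Int) < q := by omega
          have : (PySem.Int.floordiv c q + if (j : Int) < PySem.Int.mod c q then 1 else 0)
              = 0 ∨ hs[j]? = none := by
            by_cases hcq' : c = q
            · right
              rw [← List.getElem?_eq_none_iff.mpr]
              omega
            · left; rw [hd, hm, if_neg hcq', if_neg hcq', if_neg hj]; norm_num
          rcases this with h0 | hnone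
          · rw [h0]; cases hs[j]? <;> simp
          · rw [hnone]; simp
      · -- full pass: everyone gets +10, recurse with r - 10*q
        rw [not_le] at hcq
        have hkeq : min q c = q := by omega
        have hr2 : st.2 = r - 10 * q := by rw [hp2, hkc, hkeq]
        have hrq : 0 < r - 10 * q := by nlinarith
        obtain ⟨hlen', hidx'⟩ := ih st.2 (by omega) q st.1 hq (by rw [hplen, hlen])
        have hc' : pvCeil10 st.2 = c - q := by
          rw [hr2]
          exact (PySem.Int.neg_floordiv_neg_eq_iff_of_pos (by norm_num)).mpr
            (by constructor <;> nlinarith)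
        have hfd := (PySem.Int.floordiv_eq_iff_of_pos (a := c) (q := PySem.Int.floordiv c q) hq).mp rfl
        have hd' : PySem.Int.floordiv (c - q) q = PySem.Int.floordiv c q - 1 :=
          (PySem.Int.floordiv_eq_iff_of_pos hq).mpr (by constructor <;> nlinarith)
        have hm' : PySem.Int.mod (c - q) q = PySem.Int.mod c q := by
          have h1 := PySem.Int.floordiv_mul_add_mod c q
          have h2 := PySem.Int.floordiv_mul_add_mod (c - q) q
          rw [hd'] at h2
          nlinarith [h1, h2]
        refine ⟨by rw [hlen', hplen], ?_⟩
        intro j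
        rw [hidx' j, if_pos (show (0:Int) < st.2 by omega), hpidx j, hkc, hkeq,
          if_pos hr, hc', hd', hm']
        by_cases hj : (j : Int) < q
        · rw [if_pos (show (0:Int) ≤ (j:Int) ∧ (j:Int) < 0 + q from ⟨by omega, by omega⟩)]
          cases hs[j]? with
          | none => simp
          | some x =>
            simp only [Option.map_some, Option.some.injEq]
            split_ifs <;> ring
        · have hnone : hs[j]? = none := List.getElem?_eq_none_iff.mpr (by omega)
          rw [if_neg (show ¬((0:Int) ≤ (j:Int) ∧ (j:Int) < 0 + q) by omega), hnone]
          simp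
    · rw [pvA_loop, dif_neg (by omega)]
      exact ⟨rfl, fun j => by rw [if_neg hr]⟩

-- the initial 'for i in range(q): horas_funcionarios.append(20)'
theorem pvA_init_eq (l : List Int) : ∀ acc : List Int,
    l.foldl (fun acc _ => acc ++ [20]) acc = acc ++ List.replicate l.length 20 := by
  induction l with
  | nil => intro acc; simp
  | cons i t ih => intro acc; simp [ih, List.replicate_succ, List.append_assoc]

-- ===== VERDICT (by name: the statement is the Claim_ definition above) =====
theorem distribuir_horas_trabalho_spec : Claim_equal_distribuir_horas_trabalho := by
  intro h q _ hpre
  unfold Spec_distribuir_horas_trabalho distribuir_horas_trabalho distribuir_horas_trabalho_alt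
  simp only []
  rw [pvA_init_eq, PySem.List.length_pyRange_one]
  simp only [List.nil_append]
  set r := h - 20 * q with hrdef
  by_cases hq : 0 < q
  · by_cases hr : 0 < r
    · rw [if_neg (by omega)]
      obtain ⟨hlen, hidx⟩ := pvA_loop_spec r.toNat r (le_refl _) q
        (List.replicate (q - 0).toNat 20) hq (by simp)
      apply List.ext_getElem?
      intro j
      rw [hidx j, if_pos hr]
      by_cases hj : j < q.toNat
      · have h1 : (List.replicate (q - 0).toNat (20:Int))[j]? = some (20:Int) := by
          rw [List.getElem?_replicate, if_pos (show j < (q - 0).toNat by omega)]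
        have h2 := PySem.List.getElem?_map_pyRange_zero
          (fun i => 20 + 10 * (PySem.Int.floordiv (-PySem.Int.floordiv (-r) 10) q
            + if i < PySem.Int.mod (-PySem.Int.floordiv (-r) 10) q then 1 else 0))
          q.toNat j hj
        rw [show ((q.toNat : Int)) = q by omega] at h2
        simp only [h1, h2, Option.map_some, Option.some.injEq, pvCeil10]
        rfl
      · have h1 : (List.replicate (q - 0).toNat (20:Int))[j]? = none := by
          rw [List.getElem?_replicate, if_neg (show ¬ j < (q - 0).toNat by omega)]
        simp only [h1, Option.map_none]
        symm
        rw [List.getElem?_eq_none_iff]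
        simp only [List.length_map, PySem.List.length_pyRange_one]
        omega
    · rw [if_pos (Or.inr (by omega)), pvA_loop, dif_neg (by omega)]
      simp
  · -- q ≤ 0: both sides are the empty list
    rw [if_pos (Or.inl (by omega)), pvA_loop, dif_neg (by omega)]
    norm_num
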